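-- pv_equiv track=rewrite | github.com/chunyuema/leetcode | q1624/q1624.py | maxLengthBetweenEqualCharacters
-- ===== SOURCE A (Python) =====
-- def maxLengthBetweenEqualCharacters(s: str) -> int:
--     firstIndexMap = {}
--     maxLen = -1
--     for i in range(len(s)):
--         if s[i] in firstIndexMap:
--             maxLen = max(maxLen, i - firstIndexMap[s[i]] - 1)
--         else:
--             firstIndexMap[s[i]] = i
--     return maxLen
-- ===== SOURCE B (Python) =====
-- def maxLengthBetweenEqualCharacters(s: str) -> int:
--     best = -1
--     for c in set(s):
--         best = max(best, s.rindex(c) - s.index(c) - 1)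
--     return best
-- ===== Notes on version B (the rewrite author's own statement) =====
-- stated objective: idiomatic
-- what changed: Instead of a positional sweep that builds a first-index dictionary and maximizes per position, B loops over the distinct characters and takes the max of s.rindex(c)-s.index(c)-1 per character, seeded with -1.
import Mathlib
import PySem

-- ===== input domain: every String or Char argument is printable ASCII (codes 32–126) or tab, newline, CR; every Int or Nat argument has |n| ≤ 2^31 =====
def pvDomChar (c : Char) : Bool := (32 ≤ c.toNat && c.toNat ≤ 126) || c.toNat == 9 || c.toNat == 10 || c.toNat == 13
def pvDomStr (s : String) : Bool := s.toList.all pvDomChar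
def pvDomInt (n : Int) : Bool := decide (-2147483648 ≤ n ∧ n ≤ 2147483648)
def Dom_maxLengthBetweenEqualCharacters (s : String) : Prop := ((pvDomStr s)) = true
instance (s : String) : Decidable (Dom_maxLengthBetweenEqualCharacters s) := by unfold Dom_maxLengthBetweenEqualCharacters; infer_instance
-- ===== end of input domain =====

-- B loops over the distinct characters of s, taking the max of rindex(c)-index(c)-1,
-- instead of A's positional sweep with a first-index dictionary (objective: more idiomatic).

-- ===== PORT A =====
-- A: for i in range(len(s)): consult/extend a first-index dict, maximize i - first[s[i]] - 1.
def maxLengthBetweenEqualCharacters (s : String) : Int :=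
  let xs := s.toList
  ((PySem.List.pyRange 0 (PySem.Str.len s) 1).foldl
    (fun (st : PySem.Dict Char Int × Int) i =>
      match st.1.get? (PySem.List.pyGetD xs i ' ') with  -- s[i]; i is always in range here
      | some f => (st.1, max st.2 (i - f - 1))
      | none => (st.1.insert (PySem.List.pyGetD xs i ' ') i, st.2))
    (PySem.Dict.empty, -1)).2

-- ===== PORT B =====
-- B: for c in set(s): best = max(best, s.rindex(c) - s.index(c) - 1).
-- s.index(c) / s.rindex(c) are ported by hand as first index / (len-1 - first index in the
-- reverse); exact here because each c comes from set(s), so c occurs and neither raises.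
def maxLengthBetweenEqualCharacters_alt (s : String) : Int :=
  let xs := s.toList
  (PySem.Set.ofList xs).foldl
    (fun best c =>
      max best (((xs.length : Int) - 1 - (List.idxOf c xs.reverse : Int))
                - (List.idxOf c xs : Int) - 1))
    (-1)

-- ===== PRECONDITION & SPEC =====
def Spec_maxLengthBetweenEqualCharacters (s : String) (out : Int) : Prop := out = maxLengthBetweenEqualCharacters_alt s
instance (s : String) (out : Int) : Decidable (Spec_maxLengthBetweenEqualCharacters s out) := by unfold Spec_maxLengthBetweenEqualCharacters; infer_instance

-- ===== CLAIM (what is proved, stated in full; the proofs are below) =====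
def Claim_equal_maxLengthBetweenEqualCharacters : Prop := ∀ (s : String), Dom_maxLengthBetweenEqualCharacters s → Spec_maxLengthBetweenEqualCharacters s (maxLengthBetweenEqualCharacters s)

-- ===== LEMMAS AND PROOFS =====

-- first index of c in xs, as Int
def fIdx (xs : List Char) (c : Char) : Int := (List.idxOf c xs : Int)
-- last index of c in xs, as Int
def lIdx (xs : List Char) (c : Char) : Int := (xs.length : Int) - 1 - (List.idxOf c xs.reverse : Int)
-- B's loop, on a character list
def bb (xs : List Char) : Int :=
  (PySem.Set.ofList xs).foldl (fun m c => max m (lIdx xs c - fIdx xs c - 1)) (-1)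
-- A's loop body, on (index, character) pairs
def stepA (st : PySem.Dict Char Int × Int) (p : Int × Char) : PySem.Dict Char Int × Int :=
  match st.1.get? p.2 with
  | some f => (st.1, max st.2 (p.1 - f - 1))
  | none => (st.1.insert p.2 p.1, st.2)

lemma B_eq_bb (s : String) : maxLengthBetweenEqualCharacters_alt s = bb s.toList := rfl

lemma A_eq_enum (s : String) :
    maxLengthBetweenEqualCharacters s
      = ((PySem.List.enumerate s.toList).foldl stepA (PySem.Dict.empty, -1)).2 := by
  simp only [maxLengthBetweenEqualCharacters,
    PySem.List.enumerate_eq_map_pyRange s.toList ' ', List.foldl_map, stepA,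
    PySem.Str.len_eq, PySem.List.len]

lemma ofList_snoc (xs : List Char) (x : Char) :
    PySem.Set.ofList (xs ++ [x])
      = if x ∈ xs then PySem.Set.ofList xs else PySem.Set.ofList xs ++ [x] := by
  have h : PySem.Set.ofList (xs ++ [x]) = PySem.Set.add (PySem.Set.ofList xs) x := by
    simp [PySem.Set.ofList_eq_foldl, List.foldl_append]
  rw [h, PySem.Set.add]
  by_cases hx : x ∈ xs <;>
    simp [PySem.Set.contains, PySem.Set.mem_ofList, hx]

-- seed-distribution for a running max
lemma foldl_max_seed (f : Char → Int) (l : List Char) (m0 v : Int) :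
    l.foldl (fun m a => max m (f a)) (max m0 v)
      = max (l.foldl (fun m a => max m (f a)) m0) v := by
  induction l generalizing m0 with
  | nil => rfl
  | cons a t ih =>
      simp only [List.foldl_cons]
      rw [show max (max m0 v) (f a) = max (max m0 (f a)) v by omega, ih]

-- raising the value of a running max at one member of a duplicate-free list
lemma foldl_max_update {l : List Char} (hnd : l.Nodup) {c : Char} (hc : c ∈ l)
    (f g : Char → Int) (hfg : ∀ a ∈ l, a ≠ c → g a = f a) {v : Int} (hgc : g c = v)
    (hv : f c ≤ v) (m0 : Int) :
    l.foldl (fun m a => max m (g a)) m0 = max (l.foldl (fun m a => max m (f a)) m0) v := by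
  induction l generalizing m0 with
  | nil => cases hc
  | cons a t ih =>
      rcases List.nodup_cons.mp hnd with ⟨ha, hndt⟩
      simp only [List.foldl_cons]
      by_cases hac : a = c
      · have hnotc : c ∉ t := hac ▸ ha
        rw [hac]
        have hcg : t.foldl (fun m a => max m (g a)) (max m0 (g c))
            = t.foldl (fun m a => max m (f a)) (max m0 (g c)) := by
          apply PySem.List.foldl_congr_mem
          intro acc x hx
          rw [hfg x (List.mem_cons_of_mem _ hx) (fun h => hnotc (h ▸ hx))]
        rw [hcg, hgc, foldl_max_seed, foldl_max_seed]
        have := (PySem.List.le_foldl_max_int t f m0).1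
        omega
      · rcases List.mem_cons.mp hc with hc1 | hc1
        · exact absurd hc1.symm hac
        · rw [hfg a (List.mem_cons_self) hac,
            ih hndt hc1 (fun a ha hne => hfg a (List.mem_cons_of_mem _ ha) hne) (max m0 (f a))]

lemma fIdx_snoc_mem {xs : List Char} {c : Char} (x : Char) (hc : c ∈ xs) :
    fIdx (xs ++ [x]) c = fIdx xs c := by
  simp [fIdx, List.idxOf_append, hc]

lemma fIdx_snoc_self {xs : List Char} {x : Char} (hx : x ∉ xs) :
    fIdx (xs ++ [x]) x = (xs.length : Int) := by
  simp [fIdx, List.idxOf_append, hx]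

lemma lIdx_snoc_ne {xs : List Char} {c x : Char} (hne : c ≠ x) :
    lIdx (xs ++ [x]) c = lIdx xs c := by
  simp only [lIdx, List.reverse_append, List.reverse_cons, List.reverse_nil, List.nil_append,
    List.singleton_append, List.length_append, List.length_cons, List.length_nil,
    List.idxOf_cons]
  have : (x == c) = false := by simp [Ne.symm hne]
  simp [this]
  ring

lemma lIdx_snoc_self (xs : List Char) (x : Char) :
    lIdx (xs ++ [x]) x = (xs.length : Int) := by
  simp only [lIdx, List.reverse_append, List.reverse_cons, List.reverse_nil, List.nil_append,
    List.singleton_append, List.idxOf_cons, List.length_append]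
  simp

lemma lIdx_le (xs : List Char) (c : Char) : lIdx xs c ≤ (xs.length : Int) - 1 := by
  simp only [lIdx]
  have : (0 : Int) ≤ (List.idxOf c xs.reverse : Int) := Int.natCast_nonneg _
  omega

-- the loop invariant of A's sweep: the dict holds first indices, the accumulator equals B's loop
theorem invA (xs : List Char) :
    (∀ c, ((PySem.List.enumerate xs).foldl stepA (PySem.Dict.empty, -1)).1.get? c
        = if c ∈ xs then some (fIdx xs c) else none)
    ∧ ((PySem.List.enumerate xs).foldl stepA (PySem.Dict.empty, -1)).2 = bb xs := by
  induction xs using List.reverseRecOn with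
  | nil =>
      constructor
      · intro c; simp [PySem.List.enumerate, PySem.Dict.get?, PySem.Dict.empty]
      · simp [PySem.List.enumerate, bb, PySem.Set.ofList]
  | append_singleton xs x ih =>
      obtain ⟨ihd, ihm⟩ := ih
      have henum : PySem.List.enumerate (xs ++ [x])
          = PySem.List.enumerate xs ++ [((xs.length : Int), x)] := by
        rw [PySem.List.enumerate_append]
        simp [PySem.List.enumerate_cons, PySem.List.enumerate_nil]
      rw [henum, List.foldl_append]
      set st := (PySem.List.enumerate xs).foldl stepA (PySem.Dict.empty, -1) with hst
      simp only [List.foldl_cons, List.foldl_nil]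
      by_cases hx : x ∈ xs
      · -- repeated character: dict unchanged, accumulator maximized
        have hget : st.1.get? x = some (fIdx xs x) := by rw [ihd x]; simp [hx]
        have hstep : stepA st ((xs.length : Int), x)
            = (st.1, max st.2 ((xs.length : Int) - fIdx xs x - 1)) := by
          rw [stepA, hget]
        rw [hstep]
        constructor
        · intro c
          rw [ihd c]
          by_cases hc : c ∈ xs
          · simp only [List.mem_append, hc, true_or, if_true, fIdx_snoc_mem x hc]
          · have : c ≠ x := fun h => hc (h ▸ hx)
            simp [hc, this]
        · -- bb (xs ++ [x]) = max (bb xs) (len - fIdx xs x - 1)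
          have hset : PySem.Set.ofList (xs ++ [x]) = PySem.Set.ofList xs := by
            rw [ofList_snoc]; simp [hx]
          have hbb : bb (xs ++ [x]) = max (bb xs) ((xs.length : Int) - fIdx xs x - 1) := by
            have hfg' : ∀ a ∈ PySem.Set.ofList xs, a ≠ x →
                (fun c => lIdx (xs ++ [x]) c - fIdx (xs ++ [x]) c - 1) a
                  = (fun c => lIdx xs c - fIdx xs c - 1) a := by
              intro a ha hne
              show lIdx (xs ++ [x]) a - fIdx (xs ++ [x]) a - 1 = lIdx xs a - fIdx xs a - 1
              rw [lIdx_snoc_ne hne, fIdx_snoc_mem x ((PySem.Set.mem_ofList xs a).mp ha)]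
            have hgc' : (fun c => lIdx (xs ++ [x]) c - fIdx (xs ++ [x]) c - 1) x
                = (xs.length : Int) - fIdx xs x - 1 := by
              show lIdx (xs ++ [x]) x - fIdx (xs ++ [x]) x - 1 = _
              rw [lIdx_snoc_self, fIdx_snoc_mem x hx]
            have hv' : (fun c => lIdx xs c - fIdx xs c - 1) x
                ≤ (xs.length : Int) - fIdx xs x - 1 := by
              show lIdx xs x - fIdx xs x - 1 ≤ _
              have := lIdx_le xs x
              omega
            simp only [bb, hset]
            rw [foldl_max_update (PySem.Set.nodup_ofList xs)
                ((PySem.Set.mem_ofList xs x).mpr hx) _ _ hfg' hgc' hv']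
          show max st.2 ((xs.length : Int) - fIdx xs x - 1) = bb (xs ++ [x])
          rw [hbb, ihm]
      · -- new character: dict extended, accumulator unchanged
        have hget : st.1.get? x = none := by rw [ihd x]; simp [hx]
        have hstep : stepA st ((xs.length : Int), x)
            = (st.1.insert x (xs.length : Int), st.2) := by
          rw [stepA, hget]
        rw [hstep]
        constructor
        · intro c
          rw [PySem.Dict.get?_insert, ihd c]
          by_cases hcx : c = x
          · subst hcx
            simp [hx, fIdx_snoc_self hx]
          · by_cases hc : c ∈ xs <;> simp [fIdx_snoc_mem x, *]
        · have hset : PySem.Set.ofList (xs ++ [x]) = PySem.Set.ofList xs ++ [x] := by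
            rw [ofList_snoc]; simp [hx]
          have hbb : bb (xs ++ [x]) = bb xs := by
            simp only [bb, hset]
            rw [List.foldl_append]
            have hcongr : (PySem.Set.ofList xs).foldl
                (fun m c => max m (lIdx (xs ++ [x]) c - fIdx (xs ++ [x]) c - 1)) (-1)
                = (PySem.Set.ofList xs).foldl
                (fun m c => max m (lIdx xs c - fIdx xs c - 1)) (-1) := by
              apply PySem.List.foldl_congr_mem
              intro acc a ha
              have haxs : a ∈ xs := (PySem.Set.mem_ofList xs a).mp ha
              have hne : a ≠ x := fun h => hx (h ▸ haxs)
              rw [lIdx_snoc_ne hne, fIdx_snoc_mem x haxs]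
            rw [hcongr]
            simp only [List.foldl_cons, List.foldl_nil]
            rw [lIdx_snoc_self, fIdx_snoc_self hx]
            have := (PySem.List.le_foldl_max_int (PySem.Set.ofList xs)
              (fun c => lIdx xs c - fIdx xs c - 1) (-1)).1
            omega
          show st.2 = bb (xs ++ [x])
          rw [hbb, ihm]

-- ===== VERDICT (by name: the statement is the Claim_ definition above) =====
theorem maxLengthBetweenEqualCharacters_spec : Claim_equal_maxLengthBetweenEqualCharacters := by
  intro s _
  unfold Spec_maxLengthBetweenEqualCharacters
  rw [A_eq_enum, (invA s.toList).2, B_eq_bb]
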